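-- pv_equiv track=rewrite | github.com/threeandthreee/Archipelago | worlds/shapez/shapesanity test.py | color_to_needed_building
-- ===== SOURCE A (Python) =====
-- from typing import List, Dict
--
-- def color_to_needed_building(color_list: List[str]) -> str:
--     for next_color in color_list:
--         if next_color in ["Yellow", "Purple", "Cyan", "White", "y", "p", "c", "w"]:
--             return "Mixed"
--     for next_color in color_list:
--         if next_color not in ["Uncolored", "u"]:
--             return "Painted"
--     return "Uncolored"
-- ===== SOURCE B (Python) =====
-- def color_to_needed_building(color_list):
--     painted = False
--     for next_color in color_list:
--         if next_color in ("Yellow", "Purple", "Cyan", "White", "y", "p", "c", "w"):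
--             return "Mixed"
--         if next_color not in ("Uncolored", "u"):
--             painted = True
--     return "Painted" if painted else "Uncolored"
-- ===== Notes on version B (the rewrite author's own statement) =====
-- stated objective: simpler
-- what changed: Fuses A's two sequential scans into a single pass that returns Mixed immediately and tracks a 'painted' boolean flag, deciding Painted vs Uncolored after the loop.
import Mathlib
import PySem

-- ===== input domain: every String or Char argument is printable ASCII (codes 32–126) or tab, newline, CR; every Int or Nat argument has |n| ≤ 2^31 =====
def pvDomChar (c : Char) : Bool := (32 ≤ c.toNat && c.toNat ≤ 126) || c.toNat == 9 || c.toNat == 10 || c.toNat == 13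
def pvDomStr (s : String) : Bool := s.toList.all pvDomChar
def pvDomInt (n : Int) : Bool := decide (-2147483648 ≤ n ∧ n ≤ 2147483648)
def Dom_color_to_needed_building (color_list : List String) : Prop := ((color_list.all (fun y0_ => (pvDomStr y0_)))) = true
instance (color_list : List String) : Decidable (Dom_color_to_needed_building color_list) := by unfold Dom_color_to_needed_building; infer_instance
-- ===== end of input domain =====

-- B fuses A's two sequential scans into a single pass with a 'painted' flag; objective: simpler.

-- ===== PORT A =====
-- A's first loop: early-return "Mixed" on a mixed color, else fall through (none)
def pvLoopMixed : List String → Option String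
  | [] => none
  | c :: r =>
    if c ∈ ["Yellow", "Purple", "Cyan", "White", "y", "p", "c", "w"] then some "Mixed"
    else pvLoopMixed r

-- A's second loop: early-return "Painted" on a non-uncolored color, else fall through (none)
def pvLoopPainted : List String → Option String
  | [] => none
  | c :: r =>
    if c ∉ ["Uncolored", "u"] then some "Painted"
    else pvLoopPainted r

def color_to_needed_building (color_list : List String) : String :=
  match pvLoopMixed color_list with
  | some s => s
  | none =>
    match pvLoopPainted color_list with
    | some s => s
    | none => "Uncolored"

-- ===== PORT B =====
-- single pass carrying the 'painted' flag
def pvGoB : List String → Bool → String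
  | [], painted => if painted then "Painted" else "Uncolored"
  | c :: r, painted =>
    if c ∈ ["Yellow", "Purple", "Cyan", "White", "y", "p", "c", "w"] then "Mixed"
    else pvGoB r (if c ∉ ["Uncolored", "u"] then true else painted)

def color_to_needed_building_alt (color_list : List String) : String :=
  pvGoB color_list false

-- ===== PRECONDITION & SPEC =====
def Spec_color_to_needed_building (color_list : List String) (out : String) : Prop := out = color_to_needed_building_alt color_list
instance (color_list : List String) (out : String) : Decidable (Spec_color_to_needed_building color_list out) := by unfold Spec_color_to_needed_building; infer_instance

-- ===== CLAIM (what is proved, stated in full; the proofs are below) =====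
def Claim_equal_color_to_needed_building : Prop := ∀ (color_list : List String), Dom_color_to_needed_building color_list → Spec_color_to_needed_building color_list (color_to_needed_building color_list)

-- ===== LEMMAS AND PROOFS =====
theorem pvGoB_char (l : List String) : ∀ (p : Bool),
    pvGoB l p =
      match pvLoopMixed l with
      | some s => s
      | none => if p || (pvLoopPainted l).isSome then "Painted" else "Uncolored" := by
  induction l with
  | nil => intro p; simp [pvGoB, pvLoopMixed, pvLoopPainted]
  | cons c r ih =>
    intro p
    by_cases hm : c ∈ ["Yellow", "Purple", "Cyan", "White", "y", "p", "c", "w"]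
    · simp [pvGoB, pvLoopMixed, hm]
    · by_cases hu : c ∈ ["Uncolored", "u"]
      · simp [pvGoB, pvLoopMixed, pvLoopPainted, hm, hu, ih]
      · simp [pvGoB, pvLoopMixed, pvLoopPainted, hm, hu, ih]

theorem pvLoopPainted_eq : ∀ (l : List String) (s : String), pvLoopPainted l = some s → s = "Painted" := by
  intro l
  induction l with
  | nil => intro s h; simp [pvLoopPainted] at h
  | cons c r ih =>
    intro s h
    by_cases hu : c ∈ ["Uncolored", "u"]
    · exact ih s (by simpa [pvLoopPainted, hu] using h)
    · simp [pvLoopPainted, hu] at h; exact h.symm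

-- ===== VERDICT (by name: the statement is the Claim_ definition above) =====
theorem color_to_needed_building_spec : Claim_equal_color_to_needed_building := by
  intro l _
  unfold Spec_color_to_needed_building color_to_needed_building color_to_needed_building_alt
  rw [pvGoB_char]
  cases hm : pvLoopMixed l with
  | some s => rfl
  | none =>
    cases hp : pvLoopPainted l with
    | none => simp [hp]
    | some s => simp [hp, pvLoopPainted_eq l s hp]
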